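-- pv_equiv track=rewrite | github.com/yannickloth/W33-Theory | tools/explicit_coset_bijection.py | check_symplectic
-- ===== SOURCE A (Python) =====
-- def check_symplectic(M):
--     """Check if M preserves symplectic form."""
--     Omega = [[0, 0, 1, 0], [0, 0, 0, 1], [2, 0, 0, 0], [0, 2, 0, 0]]
--
--     def mat_mult(A, B):
--         n, k, m = len(A), len(B), len(B[0])
--         result = [[0] * m for _ in range(n)]
--         for i in range(n):
--             for j in range(m):
--                 for l in range(k):
--                     result[i][j] = (result[i][j] + A[i][l] * B[l][j]) % 3
--         return result
--
--     MT = [[M[j][i] for j in range(4)] for i in range(4)]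
--     result = mat_mult(mat_mult(MT, Omega), M)
--     return result == Omega
-- ===== SOURCE B (Python) =====
-- def check_symplectic(M):
--     """Check if M preserves symplectic form."""
--     Omega = [[0, 0, 1, 0], [0, 0, 0, 1], [2, 0, 0, 0], [0, 2, 0, 0]]
--
--     def omega_ip(u, v):
--         # u^T * Omega * v mod 3 for the fixed Omega above
--         return (u[0] * v[2] + u[1] * v[3] + 2 * u[2] * v[0] + 2 * u[3] * v[1]) % 3
--
--     def col(k):
--         return [M[0][k], M[1][k], M[2][k], M[3][k]]
--
--     cols = [col(i) for i in range(4)]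
--     result = [[omega_ip(cols[i], col(j)) for j in range(len(M[0]))] for i in range(4)]
--     return result == Omega
-- ===== Notes on version B (the rewrite author's own statement) =====
-- stated objective: alternative
-- what changed: Replaces A's generic transpose plus two triple-loop matrix multiplications (M^T * Omega * M mod 3) with a direct one-pass computation of each Gram entry as the symplectic inner product omega(col_i, col_j) of the columns of M for the fixed Omega.
import Mathlib
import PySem

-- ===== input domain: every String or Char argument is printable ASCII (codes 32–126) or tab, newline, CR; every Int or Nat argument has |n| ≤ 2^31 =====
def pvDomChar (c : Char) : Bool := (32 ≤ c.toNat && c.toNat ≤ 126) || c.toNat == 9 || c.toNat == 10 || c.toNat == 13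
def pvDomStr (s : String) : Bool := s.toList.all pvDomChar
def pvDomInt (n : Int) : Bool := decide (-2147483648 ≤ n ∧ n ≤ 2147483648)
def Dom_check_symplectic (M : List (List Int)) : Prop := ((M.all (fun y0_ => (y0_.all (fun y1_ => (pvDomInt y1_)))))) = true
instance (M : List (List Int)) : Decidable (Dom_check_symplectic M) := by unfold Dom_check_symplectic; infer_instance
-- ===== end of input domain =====

-- B computes result[i][j] directly as the symplectic inner product ω(col_i, col_j) of the
-- columns of M, eliminating A's generic transpose and two triple-loop matrix multiplications.

-- ===== PORT A =====
-- Python's Omega constant.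
def omegaMat : List (List Int) := [[0, 0, 1, 0], [0, 0, 0, 1], [2, 0, 0, 0], [0, 2, 0, 0]]

-- mat_mult: the l-loop mutates only result[i][j], so it is this foldl over the same values;
-- indexing is getD 0 — exact on inputs where Python's indices are in range (guaranteed by Pre_).
def matMult (A B : List (List Int)) : List (List Int) :=
  let n := A.length
  let k := B.length
  let m := (B.headD []).length
  (List.range n).map (fun i =>
    (List.range m).map (fun j =>
      (List.range k).foldl
        (fun acc l => (acc + (A.getD i []).getD l 0 * (B.getD l []).getD j 0) % 3) 0))

def check_symplectic (M : List (List Int)) : Bool :=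
  let MT := (List.range 4).map (fun i => (List.range 4).map (fun j => (M.getD j []).getD i 0))
  let result := matMult (matMult MT omegaMat) M
  result == omegaMat

-- ===== PORT B =====
def omegaIp (u v : List Int) : Int :=
  (u.getD 0 0 * v.getD 2 0 + u.getD 1 0 * v.getD 3 0
    + 2 * u.getD 2 0 * v.getD 0 0 + 2 * u.getD 3 0 * v.getD 1 0) % 3

def colOf (M : List (List Int)) (k : Nat) : List Int :=
  [(M.getD 0 []).getD k 0, (M.getD 1 []).getD k 0, (M.getD 2 []).getD k 0, (M.getD 3 []).getD k 0]

def check_symplectic_alt (M : List (List Int)) : Bool :=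
  let cols := (List.range 4).map (colOf M)
  let result := (List.range 4).map (fun i =>
    (List.range ((M.headD []).length)).map (fun j => omegaIp (cols.getD i []) (colOf M j)))
  result == omegaMat

-- ===== PRECONDITION & SPEC =====
-- Pre_ excludes exactly the inputs where Python A raises IndexError: M must have exactly 4 rows
-- (fewer: transpose raises; more: the second mat_mult indexes a 4-wide row out of range), each
-- row at least 4 wide (transpose) and at least len(M[0]) wide (the j-loop of the last product).
def Pre_check_symplectic (M : List (List Int)) : Prop :=
  M.length = 4 ∧ 4 ≤ (M.headD []).length ∧ ∀ row ∈ M, (M.headD []).length ≤ row.length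
instance (M : List (List Int)) : Decidable (Pre_check_symplectic M) := by
  unfold Pre_check_symplectic; infer_instance

def pvWitness_check_symplectic : List (List Int) :=
  [[1, 0, 0, 0], [0, 1, 0, 0], [0, 0, 1, 0], [0, 0, 0, 1]]

def Spec_check_symplectic (M : List (List Int)) (out : Bool) : Prop := out = check_symplectic_alt M
instance (M : List (List Int)) (out : Bool) : Decidable (Spec_check_symplectic M out) := by
  unfold Spec_check_symplectic; infer_instance

-- ===== CLAIM (what is proved, stated in full; the proofs are below) =====
def Claim_equal_check_symplectic : Prop := ∀ (M : List (List Int)), Dom_check_symplectic M → Pre_check_symplectic M → Spec_check_symplectic M (check_symplectic M)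

-- ===== LEMMAS AND PROOFS =====

-- Each summand of A's (doubly mod-reduced) row entry is congruent mod 3 to the matching
-- summand of B's symplectic inner product.
lemma pv_key (p q r s x y z w : Int) :
    (p * 2 % 3 * x + q * 2 % 3 * y + r % 3 * z + s % 3 * w) % 3
      = (r * z + s * w + 2 * p * x + 2 * q * y) % 3 := by
  have h : ∀ a : Int, a % 3 ≡ a [ZMOD 3] := fun a => Int.emod_emod_of_dvd a dvd_rfl
  have hm := ((((h (p * 2)).mul_right x).add ((h (q * 2)).mul_right y)).add
      ((h r).mul_right z)).add ((h s).mul_right w)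
  calc (p * 2 % 3 * x + q * 2 % 3 * y + r % 3 * z + s % 3 * w) % 3
      = (p * 2 * x + q * 2 * y + r * z + s * w) % 3 := hm
    _ = (r * z + s * w + 2 * p * x + 2 * q * y) % 3 := by congr 1; ring

-- One row of A's final product equals the corresponding row of B's Gram matrix.
lemma pv_row (p q r s : Int) (a b c d : List Int) (n : Nat) :
    List.map (fun j => (p * 2 % 3 * a.getD j 0 + q * 2 % 3 * b.getD j 0
        + r % 3 * c.getD j 0 + s % 3 * d.getD j 0) % 3) (List.range n)
    = List.map (fun j => (r * c.getD j 0 + s * d.getD j 0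
        + 2 * p * a.getD j 0 + 2 * q * b.getD j 0) % 3) (List.range n) :=
  List.map_congr_left (fun j _ =>
    pv_key p q r s (a.getD j 0) (b.getD j 0) (c.getD j 0) (d.getD j 0))

lemma pv_four_rows (a b c d : List Int) :
    check_symplectic [a, b, c, d] = check_symplectic_alt [a, b, c, d] := by
  simp [check_symplectic, check_symplectic_alt, matMult, omegaMat, omegaIp, colOf,
    List.range_succ]
  simp only [← List.getD_eq_getElem?_getD]
  rw [pv_row, pv_row, pv_row, pv_row]

-- ===== VERDICT (by name: the statement is the Claim_ definition above) =====
theorem check_symplectic_spec : Claim_equal_check_symplectic := by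
  intro M _ hpre
  obtain ⟨h4, -, -⟩ := hpre
  match M, h4 with
  | [a, b, c, d], _ => exact pv_four_rows a b c d
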